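-- pv_equiv track=rewrite | github.com/azmovi/wordle-ia | wordle_ia/test.py | escolhe_palavras_com_amarelo
-- ===== SOURCE A (Python) =====
-- def indices_tipo(lista_pos: list[int], tipo: int) -> list[int]:
--     return [i for i, v in enumerate(lista_pos) if v == tipo]
--
-- def escolhe_palavras_com_amarelo(
--     palavra_teste: str,
--     lista_pos: list[int],
--     banco_de_palavras: set[str],
--     visitados: set[str],
-- ) -> tuple[set[str], set[str]]:
--
--     tipo = 1
--     novo_banco_de_palavras = set()
--     novo_visitados = visitados.copy()
--     lista_indices = indices_tipo(lista_pos, tipo)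
--
--     for indice in lista_indices:
--         letra = palavra_teste[indice]
--         if letra not in novo_visitados:
--             novo_visitados.add(letra)
--             for palavra in banco_de_palavras:
--                 if letra in palavra:
--                     novo_banco_de_palavras.add(palavra)
--
--     return novo_banco_de_palavras, novo_visitados
-- ===== SOURCE B (Python) =====
-- def escolhe_palavras_com_amarelo(
--     palavra_teste,
--     lista_pos,
--     banco_de_palavras,
--     visitados,
-- ):
--     # collect the new yellow letters once, in index order
--     alvos = []
--     for i, v in enumerate(lista_pos):
--         if v == 1:
--             letra = palavra_teste[i]
--             if letra not in visitados and letra not in alvos: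
--                 alvos.append(letra)
--
--     # single pass over the bank: drop each word into the bucket of the
--     # first new letter it contains (if any)
--     baldes = [[] for _ in alvos]
--     for palavra in banco_de_palavras:
--         for k in range(len(alvos)):
--             if alvos[k] in palavra:
--                 baldes[k].append(palavra)
--                 break
--
--     novo_banco = set()
--     for balde in baldes:
--         novo_banco.update(balde)
--     return novo_banco, visitados | set(alvos)
-- ===== Notes on version B (the rewrite author's own statement) =====
-- stated objective: alternative
-- what changed: A rescans the whole word bank once per newly discovered yellow letter, growing a result set as it goes; B first collects the list of new yellow letters, then makes a single pass over the bank dropping each word into the bucket of the first new letter it contains, and finally unions the buckets (and unions visitados with the collected letters).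
import Mathlib
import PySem

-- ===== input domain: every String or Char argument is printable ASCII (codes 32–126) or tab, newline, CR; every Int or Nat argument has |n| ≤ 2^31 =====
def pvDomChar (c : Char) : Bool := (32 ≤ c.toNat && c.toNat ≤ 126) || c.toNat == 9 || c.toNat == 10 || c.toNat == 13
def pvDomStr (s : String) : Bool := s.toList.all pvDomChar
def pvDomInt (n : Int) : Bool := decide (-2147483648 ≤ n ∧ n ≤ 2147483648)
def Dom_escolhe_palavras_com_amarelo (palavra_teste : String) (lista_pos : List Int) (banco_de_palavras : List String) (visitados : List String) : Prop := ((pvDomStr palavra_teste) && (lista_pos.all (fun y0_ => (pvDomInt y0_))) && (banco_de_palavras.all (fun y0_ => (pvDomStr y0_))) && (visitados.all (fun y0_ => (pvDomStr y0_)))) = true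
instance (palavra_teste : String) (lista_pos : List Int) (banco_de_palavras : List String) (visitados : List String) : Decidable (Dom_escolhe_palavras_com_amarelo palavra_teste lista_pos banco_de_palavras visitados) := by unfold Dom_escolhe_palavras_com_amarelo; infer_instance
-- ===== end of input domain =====

-- B replaces A's one-bank-scan-per-new-letter by: collect the new yellow letters first,
-- then a SINGLE pass over the bank dropping each word into the bucket of the first new
-- letter it contains (alternative decomposition; return value is set-valued, proved equal
-- element-for-element in A's insertion order).

-- ===== PORT A =====
-- palavra_teste[indice] as a 1-character string; "" only where Python would raise
-- IndexError (excluded by Pre_ below); shared by both ports as the letter accessor.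
def pvLetra (palavra_teste : String) (i : Int) : String :=
  ((PySem.Str.pyGet? palavra_teste i).map (fun c => String.ofList [c])).getD ""

def indices_tipo (lista_pos : List Int) (tipo : Int) : List Int :=
  ((PySem.List.enumerate lista_pos).filter (fun p => p.2 == tipo)).map (fun p => p.1)

def escolhe_palavras_com_amarelo (palavra_teste : String) (lista_pos : List Int) (banco_de_palavras : List String) (visitados : List String) : List String × List String :=
  let lista_indices := indices_tipo lista_pos 1
  lista_indices.foldl
    (fun st indice =>
      let letra := pvLetra palavra_teste indice
      if !(PySem.Set.contains st.2 letra) then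
        (banco_de_palavras.foldl
          (fun nb palavra => if PySem.Str.isIn letra palavra then PySem.Set.add nb palavra else nb)
          st.1,
         PySem.Set.add st.2 letra)
      else st)
    (PySem.Set.empty, visitados)

-- ===== PORT B =====
def pvAlvos (palavra_teste : String) (lista_pos : List Int) (visitados : List String) : List String :=
  (PySem.List.enumerate lista_pos).foldl
    (fun alvos p =>
      if p.2 == 1 then
        let letra := pvLetra palavra_teste p.1
        if !(PySem.Set.contains visitados letra) && !(alvos.contains letra) then alvos ++ [letra]
        else alvos
      else alvos) []

-- 'for k in range(len(alvos)): if alvos[k] in palavra: baldes[k].append(palavra); break'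
def pvColoca (alvos : List String) (baldes : List (List String)) (palavra : String) : List (List String) :=
  match alvos, baldes with
  | l :: ls, b :: bs =>
      if PySem.Str.isIn l palavra then (b ++ [palavra]) :: bs else b :: pvColoca ls bs palavra
  | _, bs => bs

def escolhe_palavras_com_amarelo_alt (palavra_teste : String) (lista_pos : List Int) (banco_de_palavras : List String) (visitados : List String) : List String × List String :=
  let alvos := pvAlvos palavra_teste lista_pos visitados
  let baldes := banco_de_palavras.foldl (pvColoca alvos) (alvos.map (fun _ => []))
  let novo_banco := baldes.foldl (fun s balde => PySem.Set.update s balde) PySem.Set.empty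
  (novo_banco, PySem.Set.union visitados (PySem.Set.ofList alvos))

-- ===== PRECONDITION & SPEC =====
-- Pre_ excludes exactly the inputs where Python raises IndexError: a yellow position
-- (value 1) at an index with no letter in palavra_teste.
def Pre_escolhe_palavras_com_amarelo (palavra_teste : String) (lista_pos : List Int) (banco_de_palavras : List String) (visitados : List String) : Prop :=
  ∀ p ∈ PySem.List.enumerate lista_pos, p.2 = 1 → p.1 < (palavra_teste.toList.length : Int)
instance (palavra_teste : String) (lista_pos : List Int) (banco_de_palavras : List String) (visitados : List String) : Decidable (Pre_escolhe_palavras_com_amarelo palavra_teste lista_pos banco_de_palavras visitados) := by unfold Pre_escolhe_palavras_com_amarelo; infer_instance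

def pvWitness_escolhe_palavras_com_amarelo : String × List Int × List String × List String :=
  ("cadre", [1, 0, 1, 2, 0], ["carro", "densa", "troca"], ["x", "d"])

def Spec_escolhe_palavras_com_amarelo (palavra_teste : String) (lista_pos : List Int) (banco_de_palavras : List String) (visitados : List String) (out : List String × List String) : Prop := out = escolhe_palavras_com_amarelo_alt palavra_teste lista_pos banco_de_palavras visitados
instance (palavra_teste : String) (lista_pos : List Int) (banco_de_palavras : List String) (visitados : List String) (out : List String × List String) : Decidable (Spec_escolhe_palavras_com_amarelo palavra_teste lista_pos banco_de_palavras visitados out) := by unfold Spec_escolhe_palavras_com_amarelo; infer_instance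

-- ===== CLAIM (what is proved, stated in full; the proofs are below) =====
def Claim_equal_escolhe_palavras_com_amarelo : Prop := ∀ (palavra_teste : String) (lista_pos : List Int) (banco_de_palavras : List String) (visitados : List String), Dom_escolhe_palavras_com_amarelo palavra_teste lista_pos banco_de_palavras visitados → Pre_escolhe_palavras_com_amarelo palavra_teste lista_pos banco_de_palavras visitados → Spec_escolhe_palavras_com_amarelo palavra_teste lista_pos banco_de_palavras visitados (escolhe_palavras_com_amarelo palavra_teste lista_pos banco_de_palavras visitados)

-- ===== LEMMAS AND PROOFS =====

-- the list of new target letters A discovers, relative to a current visited set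
def pvTg (palavra_teste : String) (nv : List String) : List Int → List String
  | [] => []
  | i :: is =>
      if nv.contains (pvLetra palavra_teste i) then pvTg palavra_teste nv is
      else pvLetra palavra_teste i :: pvTg palavra_teste (nv ++ [pvLetra palavra_teste i]) is

def pvFilt (banco : List String) (l : String) : List String :=
  banco.filter (fun w => PySem.Str.isIn l w)

theorem pv_mem_update {s : List String} {xs : List String} {y : String} :
    y ∈ PySem.Set.update s xs ↔ y ∈ s ∨ y ∈ xs := by
  induction xs generalizing s with
  | nil => simp [PySem.Set.update]
  | cons x xs ih =>
      rw [show PySem.Set.update s (x :: xs) = PySem.Set.update (PySem.Set.add s x) xs from rfl, ih]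
      simp only [PySem.Set.mem_add, List.mem_cons]
      tauto

theorem pv_update_append (s x y : List String) :
    PySem.Set.update s (x ++ y) = PySem.Set.update (PySem.Set.update s x) y := by
  simp [PySem.Set.update, List.foldl_append]

theorem pv_upd_add (s t : List String) (x : String) :
    PySem.Set.update s (PySem.Set.add t x) = PySem.Set.add (PySem.Set.update s t) x := by
  by_cases hx : x ∈ t
  · have h1 : PySem.Set.add t x = t := by
      simp [PySem.Set.add, PySem.Set.contains, List.contains_iff_mem, hx]
    have h2 : PySem.Set.add (PySem.Set.update s t) x = PySem.Set.update s t := by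
      simp [PySem.Set.add, PySem.Set.contains, List.contains_iff_mem, pv_mem_update, hx]
    rw [h1, h2]
  · have h1 : PySem.Set.add t x = t ++ [x] := by
      simp [PySem.Set.add, PySem.Set.contains, List.contains_iff_mem, hx]
    rw [h1, pv_update_append]
    rfl

theorem pv_upd_upd (s t : List String) (xs : List String) :
    PySem.Set.update s (PySem.Set.update t xs) = PySem.Set.update (PySem.Set.update s t) xs := by
  induction xs generalizing t with
  | nil => rfl
  | cons x xs ih =>
      show PySem.Set.update s (PySem.Set.update (PySem.Set.add t x) xs)
        = PySem.Set.update (PySem.Set.update s t) (x :: xs)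
      rw [ih]
      exact congrArg (fun z => List.foldl PySem.Set.add z xs) (pv_upd_add s t x)

theorem pv_inner_loop (banco : List String) (l : String) (s : List String) :
    banco.foldl (fun nb w => if PySem.Str.isIn l w then PySem.Set.add nb w else nb) s
      = PySem.Set.update s (pvFilt banco l) := by
  show _ = List.foldl PySem.Set.add s (List.filter (fun w => PySem.Str.isIn l w) banco)
  rw [List.foldl_filter]

theorem pv_foldl_update_flatMap (g : String → List String) (L : List String) (s : List String) :
    L.foldl (fun s l => PySem.Set.update s (g l)) s = PySem.Set.update s (L.flatMap g) := by
  induction L generalizing s with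
  | nil => rfl
  | cons l L ih => simp [List.foldl, ih, List.flatMap_cons, pv_update_append]

theorem pv_add_of_not_mem {nv : List String} {x : String} (h : ¬ nv.contains x = true) :
    PySem.Set.add nv x = nv ++ [x] := by
  unfold PySem.Set.add PySem.Set.contains
  rw [if_neg h]

theorem pv_a_loop (palavra_teste : String) (banco : List String) :
    ∀ (idxs : List Int) (nb nv : List String),
      idxs.foldl
        (fun st indice =>
          let letra := pvLetra palavra_teste indice
          if !(PySem.Set.contains st.2 letra) then
            (banco.foldl
              (fun nb palavra => if PySem.Str.isIn letra palavra then PySem.Set.add nb palavra else nb)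
              st.1,
             PySem.Set.add st.2 letra)
          else st)
        (nb, nv)
      = ((pvTg palavra_teste nv idxs).foldl (fun s l => PySem.Set.update s (pvFilt banco l)) nb,
         nv ++ pvTg palavra_teste nv idxs) := by
  intro idxs
  induction idxs with
  | nil => intro nb nv; simp [pvTg]
  | cons i is ih =>
      intro nb nv
      by_cases h : nv.contains (pvLetra palavra_teste i) = true
      · simp only [List.foldl_cons, pvTg, h, PySem.Set.contains, Bool.not_true, Bool.false_eq_true,
          if_false, if_true]
        exact ih nb nv
      · have hadd : PySem.Set.add nv (pvLetra palavra_teste i) = nv ++ [pvLetra palavra_teste i] :=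
          pv_add_of_not_mem h
        simp only [List.foldl_cons, pvTg, h, PySem.Set.contains, Bool.not_false, if_true, if_false,
          Bool.false_eq_true, hadd, pv_inner_loop] at ih ⊢
        rw [ih]
        simp [List.append_assoc]

theorem pv_tg_update (palavra_teste : String) :
    ∀ (idxs : List Int) (nv : List String),
      PySem.Set.update nv (pvTg palavra_teste nv idxs) = nv ++ pvTg palavra_teste nv idxs := by
  intro idxs
  induction idxs with
  | nil => intro nv; simp [pvTg, PySem.Set.update]
  | cons i is ih =>
      intro nv
      by_cases h : nv.contains (pvLetra palavra_teste i) = true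
      · have hmem : pvLetra palavra_teste i ∈ nv := List.contains_iff_mem.1 h
        simp [pvTg, hmem, ih]
      · have hadd : PySem.Set.add nv (pvLetra palavra_teste i) = nv ++ [pvLetra palavra_teste i] :=
          pv_add_of_not_mem h
        have htg : pvTg palavra_teste nv (i :: is)
            = pvLetra palavra_teste i :: pvTg palavra_teste (nv ++ [pvLetra palavra_teste i]) is := by
          rw [pvTg, if_neg h]
        rw [htg]
        have hstep : PySem.Set.update nv (pvLetra palavra_teste i :: pvTg palavra_teste (nv ++ [pvLetra palavra_teste i]) is)
            = PySem.Set.update (nv ++ [pvLetra palavra_teste i]) (pvTg palavra_teste (nv ++ [pvLetra palavra_teste i]) is) := by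
          simp only [PySem.Set.update, List.foldl_cons, hadd]
        rw [hstep, ih]
        simp
      
theorem pv_b_alvos_go (palavra_teste : String) (vis : List String) :
    ∀ (idxs : List Int) (acc : List String),
      idxs.foldl
        (fun alvos i =>
          if !(PySem.Set.contains vis (pvLetra palavra_teste i)) && !(alvos.contains (pvLetra palavra_teste i))
          then alvos ++ [pvLetra palavra_teste i] else alvos) acc
      = acc ++ pvTg palavra_teste (vis ++ acc) idxs := by
  intro idxs
  induction idxs with
  | nil => intro acc; simp [pvTg]
  | cons i is ih =>
      intro acc
      by_cases h : (vis ++ acc).contains (pvLetra palavra_teste i) = true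
      · have hcond : (!(PySem.Set.contains vis (pvLetra palavra_teste i))
            && !(acc.contains (pvLetra palavra_teste i))) = false := by
          rw [List.contains_append] at h
          rcases Bool.or_eq_true_iff.1 h with h' | h' <;>
            simp [PySem.Set.contains, List.contains_iff_mem.1 h']
        simp only [List.foldl_cons, hcond, if_false, Bool.false_eq_true, pvTg, h, if_true, ih]
      · have h1 : pvLetra palavra_teste i ∉ vis := fun hm => h (by
          rw [List.contains_append]
          exact Bool.or_eq_true_iff.2 (Or.inl (List.contains_iff_mem.2 hm)))
        have h2 : pvLetra palavra_teste i ∉ acc := fun hm => h (by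
          rw [List.contains_append]
          exact Bool.or_eq_true_iff.2 (Or.inr (List.contains_iff_mem.2 hm)))
        have hcond : (!(PySem.Set.contains vis (pvLetra palavra_teste i))
            && !(acc.contains (pvLetra palavra_teste i))) = true := by
          simp [PySem.Set.contains, h1, h2]
        simp only [List.foldl_cons, hcond, if_true, pvTg, h, Bool.false_eq_true, if_false, ih]
        simp [List.append_assoc]

theorem pv_b_alvos (palavra_teste : String) (lista_pos : List Int) (vis : List String) :
    pvAlvos palavra_teste lista_pos vis = pvTg palavra_teste vis (indices_tipo lista_pos 1) := by
  have hgo := pv_b_alvos_go palavra_teste vis (indices_tipo lista_pos 1) []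
  simp only [List.nil_append, List.append_nil] at hgo
  rw [← hgo]
  unfold pvAlvos indices_tipo
  rw [List.foldl_map, List.foldl_filter]

theorem pv_coloca_nil (banco : List String) (bs : List (List String)) :
    banco.foldl (pvColoca []) bs = bs := by
  induction banco with
  | nil => rfl
  | cons w ws ih => simp [List.foldl, pvColoca, ih]

theorem pv_coloca_cons (l : String) (ls : List String) :
    ∀ (banco : List String) (b : List String) (bs : List (List String)),
      banco.foldl (pvColoca (l :: ls)) (b :: bs)
        = (b ++ pvFilt banco l)
          :: (banco.filter (fun w => !(PySem.Str.isIn l w))).foldl (pvColoca ls) bs := by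
  intro banco
  induction banco with
  | nil => intro b bs; simp [pvFilt]
  | cons w ws ih =>
      intro b bs
      by_cases h : PySem.Chars.isIn l.toList w.toList = true
      · simp [List.foldl, pvColoca, h, ih, pvFilt]
      · simp [List.foldl, pvColoca, h, ih, pvFilt]

theorem pv_foldl_update_flatten (bs : List (List String)) (s : List String) :
    bs.foldl (fun s b => PySem.Set.update s b) s = PySem.Set.update s bs.flatten := by
  induction bs generalizing s with
  | nil => rfl
  | cons b bs ih => simp [List.foldl, ih, List.flatten_cons, pv_update_append]

theorem pv_upd_drop (q : String → Bool) :
    ∀ (xs : List String) (S : List String), (∀ w ∈ xs, q w = false → w ∈ S) →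
      PySem.Set.update S (xs.filter q) = PySem.Set.update S xs := by
  intro xs
  induction xs with
  | nil => intro S _; rfl
  | cons w ws ih =>
      intro S hS
      by_cases h : q w = true
      · simp only [List.filter, h, PySem.Set.update, List.foldl]
        exact ih (PySem.Set.add S w) (fun w' hw' hq => by
          rcases (PySem.Set.mem_add S w w').2 (Or.inl (hS w' (List.mem_cons_of_mem _ hw') hq)) with h'
          exact h')
      · have hw : w ∈ S := hS w (List.mem_cons_self) (by simpa using h)
        have : PySem.Set.add S w = S := by
          simp [PySem.Set.add, PySem.Set.contains, List.contains_iff_mem, hw]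
        simp only [List.filter, h, PySem.Set.update, List.foldl, this]
        exact ih S (fun w' hw' hq => hS w' (List.mem_cons_of_mem _ hw') hq)

theorem pv_aux (banco : List String) (p : String → Bool) :
    ∀ (ls : List String) (S : List String), (∀ w ∈ banco, p w = true → w ∈ S) →
      PySem.Set.update S (ls.flatMap (fun l => pvFilt (banco.filter (fun w => !(p w))) l))
        = PySem.Set.update S (ls.flatMap (fun l => pvFilt banco l)) := by
  intro ls
  induction ls with
  | nil => intro S _; rfl
  | cons l ls ih =>
      intro S hS
      simp only [List.flatMap_cons, pv_update_append]
      have hcomm : pvFilt (banco.filter (fun w => !(p w))) l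
          = (pvFilt banco l).filter (fun w => !(p w)) := by
        simp [pvFilt, List.filter_filter, Bool.and_comm]
      have h1 : PySem.Set.update S (pvFilt (banco.filter (fun w => !(p w))) l)
          = PySem.Set.update S (pvFilt banco l) := by
        rw [hcomm]
        exact pv_upd_drop _ _ _ (fun w hw hq => by
          have : p w = true := by simpa using hq
          exact hS w (List.mem_of_mem_filter hw) this)
      rw [h1]
      exact ih _ (fun w hw hp => pv_mem_update.2 (Or.inl (hS w hw hp)))

theorem pv_main (banco : List String) :
    ∀ (L : List String) (S : List String),
      PySem.Set.update S (banco.foldl (pvColoca L) (L.map (fun _ => ([] : List String)))).flatten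
        = PySem.Set.update S (L.flatMap (fun l => pvFilt banco l)) := by
  intro L
  induction L generalizing banco with
  | nil => intro S; simp [pv_coloca_nil]
  | cons l ls ih =>
      intro S
      rw [List.map_cons, pv_coloca_cons]
      simp only [List.flatten_cons, List.nil_append, List.flatMap_cons]
      rw [pv_update_append, pv_update_append, ih]
      exact pv_aux banco (fun w => PySem.Str.isIn l w) ls _ (fun w hw hp =>
        pv_mem_update.2 (Or.inr (List.mem_filter.2 ⟨hw, hp⟩)))

-- ===== VERDICT (by name: the statement is the Claim_ definition above) =====
theorem escolhe_palavras_com_amarelo_spec : Claim_equal_escolhe_palavras_com_amarelo := by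
  intro palavra_teste lista_pos banco_de_palavras visitados _ _
  unfold Spec_escolhe_palavras_com_amarelo
  have h2 : PySem.Set.union visitados
      (PySem.Set.ofList (pvTg palavra_teste visitados (indices_tipo lista_pos 1)))
      = visitados ++ pvTg palavra_teste visitados (indices_tipo lista_pos 1) := by
    show PySem.Set.update visitados
        (PySem.Set.update ([] : List String) (pvTg palavra_teste visitados (indices_tipo lista_pos 1)))
      = _
    rw [pv_upd_upd]
    show PySem.Set.update visitados (pvTg palavra_teste visitados (indices_tipo lista_pos 1)) = _
    exact pv_tg_update palavra_teste (indices_tipo lista_pos 1) visitados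
  show escolhe_palavras_com_amarelo palavra_teste lista_pos banco_de_palavras visitados
    = escolhe_palavras_com_amarelo_alt palavra_teste lista_pos banco_de_palavras visitados
  unfold escolhe_palavras_com_amarelo escolhe_palavras_com_amarelo_alt
  rw [pv_a_loop, pv_foldl_update_flatMap, pv_b_alvos]
  show _ = (List.foldl (fun s balde => PySem.Set.update s balde) PySem.Set.empty
      (List.foldl (pvColoca (pvTg palavra_teste visitados (indices_tipo lista_pos 1)))
        (List.map (fun _ => ([] : List String)) (pvTg palavra_teste visitados (indices_tipo lista_pos 1)))
        banco_de_palavras),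
    PySem.Set.union visitados (PySem.Set.ofList (pvTg palavra_teste visitados (indices_tipo lista_pos 1))))
  rw [pv_foldl_update_flatten, pv_main, h2]
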